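-- pv_equiv track=rewrite | github.com/aalekhpatel07/AdventOfCode2020 | solutions/day_14_b.py | rpl_helper
-- ===== SOURCE A (Python) =====
-- def rpl_helper(_original, _replacement):
--     """
--     Given a list `_original`
--     that contains '0', '1', or 'X',
--     replace the occurrences of 'X'
--     in `_original` with chronological
--     values from `_replacement`.
--
--     :param _original: A list of '0',
--     '1' or 'X'.
--     :param _replacement: A list of '0',
--     or '1' that is of same length as the
--     frequency of 'X' in _original.
--
--     :return: A list of '0' or '1',
--     where 'X's got replaced by corresponding
--     entries of `_replacement`.
--
--     """
--     _result = []
--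
--     j = 0
--     for i in range(len(_original)):
--         if _original[i] == "X":
--             _result.append(_replacement[j])
--             j += 1
--         else:
--             _result.append(_original[i])
--     return "".join(_result)
-- ===== SOURCE B (Python) =====
-- def rpl_helper(_original, _replacement):
--     # Split the input into the maximal X-free segments, then stitch the
--     # segments back together with the chronological replacement values
--     # as the separators (like '<sep>'.join, but with varying separators).
--     segments = []
--     current = []
--     for c in _original:
--         if c == "X":
--             segments.append(current)
--             current = []
--         else:
--             current.append(c)
--     segments.append(current)
--     parts = ["".join(segments[0])]
--     for rep, seg in zip(_replacement, segments[1:]):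
--         parts.append(rep)
--         parts.append("".join(seg))
--     return "".join(parts)
-- ===== Notes on version B (the rewrite author's own statement) =====
-- stated objective: alternative
-- what changed: A's counter-driven per-element substitution pass is replaced by a split/stitch algorithm: split the input into its maximal 'X'-free segments, then stitch the segments back together using the chronological replacement values as the separators (a varying-separator join).
import Mathlib
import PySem

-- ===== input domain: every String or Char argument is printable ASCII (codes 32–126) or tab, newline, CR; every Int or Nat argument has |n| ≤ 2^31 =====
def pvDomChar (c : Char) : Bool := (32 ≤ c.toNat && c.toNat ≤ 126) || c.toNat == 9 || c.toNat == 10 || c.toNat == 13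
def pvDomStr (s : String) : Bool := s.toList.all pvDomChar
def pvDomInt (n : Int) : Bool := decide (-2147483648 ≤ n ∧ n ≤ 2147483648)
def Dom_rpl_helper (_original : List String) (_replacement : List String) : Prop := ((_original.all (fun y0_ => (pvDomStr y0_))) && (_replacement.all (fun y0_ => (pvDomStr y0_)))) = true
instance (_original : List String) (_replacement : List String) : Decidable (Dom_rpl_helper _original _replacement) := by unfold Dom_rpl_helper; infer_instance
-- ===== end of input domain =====

-- B replaces A's counter-driven per-element substitution pass by a split/stitch algorithm:
-- split the input into maximal 'X'-free segments, then join the segments back with the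
-- chronological replacement values as separators; same O(n) cost, different structure.

-- ===== PORT A =====
-- A's 'for i in range(len(_original))' loop reading _original[i] (always in range) is the
-- structural recursion below; '_replacement[j]' is pyGet? — it is 'some' on every input in
-- Pre_ (Python raises IndexError outside Pre_), so the .getD "" default is never used there.
def rpl_helper_go (r : List String) (j : Nat) : List String → List String
  | [] => []
  | c :: rest =>
      if c == "X" then ((PySem.List.pyGet? r (j : Int)).getD "") :: rpl_helper_go r (j + 1) rest
      else c :: rpl_helper_go r j rest

def rpl_helper (_original : List String) (_replacement : List String) : String :=
  PySem.Str.join "" (rpl_helper_go _replacement 0 _original)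

-- ===== PORT B =====
-- Source B's first loop is the foldl over _original with state (segments, current);
-- segments[0] is headD (the list is provably nonempty), segments[1:] is drop 1,
-- zip is List.zip, and the parts-building loop is the foldl appending two parts per step.
def rpl_helper_alt (_original : List String) (_replacement : List String) : String :=
  let st := _original.foldl
      (fun st c => if c == "X" then (st.1 ++ [st.2], ([] : List String)) else (st.1, st.2 ++ [c]))
      (([] : List (List String)), ([] : List String))
  let segments := st.1 ++ [st.2]
  let parts := PySem.Str.join "" (segments.headD []) ::
      ((_replacement.zip (segments.drop 1)).foldl
        (fun acc p => acc ++ [p.1, PySem.Str.join "" p.2]) [])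
  PySem.Str.join "" parts

-- ===== PRECONDITION & SPEC =====
-- Pre_: Python A raises IndexError exactly when _original contains more 'X' entries than
-- _replacement has elements; those inputs are excluded.
def Pre_rpl_helper (_original : List String) (_replacement : List String) : Prop :=
  _original.count "X" ≤ _replacement.length
instance (_original : List String) (_replacement : List String) : Decidable (Pre_rpl_helper _original _replacement) := by unfold Pre_rpl_helper; infer_instance
def pvWitness_rpl_helper : List String × List String := (["X", "0", "1", "X"], ["1", "0"])
def Spec_rpl_helper (_original : List String) (_replacement : List String) (out : String) : Prop := out = rpl_helper_alt _original _replacement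
instance (_original : List String) (_replacement : List String) (out : String) : Decidable (Spec_rpl_helper _original _replacement out) := by unfold Spec_rpl_helper; infer_instance

-- ===== CLAIM (what is proved, stated in full; the proofs are below) =====
def Claim_equal_rpl_helper : Prop := ∀ (_original : List String) (_replacement : List String), Dom_rpl_helper _original _replacement → Pre_rpl_helper _original _replacement → Spec_rpl_helper _original _replacement (rpl_helper _original _replacement)

-- ===== LEMMAS AND PROOFS =====

-- A's pass with the counter j replaced by the list of remaining replacements
def goL : List String → List String → List String
  | _, [] => []
  | rs, c :: rest => if c == "X" then rs.headD "" :: goL rs.tail rest else c :: goL rs rest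

theorem go_eq_goL (o : List String) (r : List String) (j : Nat) :
    rpl_helper_go r j o = goL (r.drop j) o := by
  induction o generalizing j with
  | nil => rfl
  | cons c rest ih =>
    by_cases hc : c = "X"
    · rw [rpl_helper_go, if_pos (by simp [hc]), goL, if_pos (by simp [hc]), ih (j + 1)]
      have h1 : (PySem.List.pyGet? r (j : Int)).getD "" = (r.drop j).headD "" := by
        simp [PySem.List.pyGet?_natCast, List.headD_eq_head?_getD, ← List.head?_drop]
      rw [h1, List.tail_drop]
    · rw [rpl_helper_go, if_neg (by simp [hc]), goL, if_neg (by simp [hc]), ih j]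

-- functional split of the input at its "X" entries (maximal X-free segments)
def splitXr : List String → List (List String)
  | [] => [[]]
  | c :: rest =>
      if c == "X" then [] :: splitXr rest
      else match splitXr rest with
           | [] => [[c]]
           | s :: ss => (c :: s) :: ss

theorem splitXr_ne_nil (o : List String) : splitXr o ≠ [] := by
  cases o with
  | nil => simp [splitXr]
  | cons c rest =>
    rw [splitXr]
    split_ifs
    · simp
    · cases h : splitXr rest <;> simp

def consHead (cur : List String) : List (List String) → List (List String)
  | [] => [cur]
  | s :: ss => (cur ++ s) :: ss

-- B's first loop computes splitXr (up to the pending current segment)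
theorem fold1 (o : List String) (segs : List (List String)) (cur : List String) :
    (o.foldl
      (fun st c => if c == "X" then (st.1 ++ [st.2], ([] : List String)) else (st.1, st.2 ++ [c]))
      (segs, cur)).1 ++
    [(o.foldl
      (fun st c => if c == "X" then (st.1 ++ [st.2], ([] : List String)) else (st.1, st.2 ++ [c]))
      (segs, cur)).2] = segs ++ consHead cur (splitXr o) := by
  induction o generalizing segs cur with
  | nil => simp [splitXr, consHead]
  | cons c rest ih =>
    rw [List.foldl_cons]
    by_cases hc : c = "X"
    · rw [if_pos (by simp [hc])]
      rw [ih (segs ++ [cur]) []]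
      rw [splitXr, if_pos (by simp [hc])]
      obtain ⟨s, ss, hss⟩ : ∃ s ss, splitXr rest = s :: ss := by
        cases h : splitXr rest with
        | nil => exact absurd h (splitXr_ne_nil rest)
        | cons s ss => exact ⟨s, ss, rfl⟩
      simp [hss, consHead]
    · rw [if_neg (by simp [hc])]
      rw [ih segs (cur ++ [c])]
      rw [splitXr, if_neg (by simp [hc])]
      cases h : splitXr rest with
      | nil => exact absurd h (splitXr_ne_nil rest)
      | cons s ss => simp [consHead]

-- character-level value of joining a list of strings with the empty separator
def cj (L : List String) : List Char := PySem.Chars.join [] (L.map String.toList)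

theorem cj_cons (a : String) (l : List String) : cj (a :: l) = a.toList ++ cj l := by
  cases l with
  | nil => simp [cj, PySem.Chars.join_singleton, PySem.Chars.join_nil]
  | cons b m => simpa [cj] using PySem.Chars.join_cons_cons [] a.toList b.toList (m.map String.toList)

-- B's stitched parts, as a function of the replacement list and the segments
def stitch (r : List String) (segs : List (List String)) : List String :=
  PySem.Str.join "" (segs.headD []) ::
    (r.zip (segs.drop 1)).flatMap (fun p => [p.1, PySem.Str.join "" p.2])

theorem toList_join_empty (L : List String) : (PySem.Str.join "" L).toList = cj L := by
  simp [PySem.Str.toList_join, cj]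

-- the heart: A's substitution pass and B's split/stitch agree character-for-character
theorem main_lemma (o : List String) (r : List String) (h : o.count "X" ≤ r.length) :
    cj (goL r o) = cj (stitch r (splitXr o)) := by
  induction o generalizing r with
  | nil =>
    simp [goL, splitXr, stitch, cj, PySem.Chars.join_singleton, PySem.Chars.join_nil,
      PySem.Str.toList_join]
  | cons c rest ih =>
    obtain ⟨s, ss, hss⟩ : ∃ s ss, splitXr rest = s :: ss := by
      cases hx : splitXr rest with
      | nil => exact absurd hx (splitXr_ne_nil rest)
      | cons s ss => exact ⟨s, ss, rfl⟩
    have hnil : (PySem.Str.join "" ([] : List String)).toList = [] := by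
      simp [PySem.Str.toList_join, PySem.Chars.join_nil]
    by_cases hc : c = "X"
    · have hcnt : rest.count "X" + 1 ≤ r.length := by
        simp only [List.count_cons, hc] at h
        simpa using h
      obtain ⟨rh, rt, hr⟩ : ∃ rh rt, r = rh :: rt := by
        cases r with
        | nil => simp at hcnt
        | cons rh rt => exact ⟨rh, rt, rfl⟩
      subst hr
      have hle : rest.count "X" ≤ rt.length := by
        simp only [List.length_cons] at hcnt; omega
      have ih' := ih rt hle
      rw [hss] at ih'
      rw [goL, if_pos (by simp [hc]), splitXr, if_pos (by simp [hc]), hss]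
      simp only [stitch, List.headD_cons, List.drop_one, List.tail_cons, List.zip_cons_cons,
        List.flatMap_cons, List.cons_append, List.nil_append] at ih' ⊢
      simp only [cj_cons] at ih' ⊢
      rw [ih', hnil]
      simp
    · have hle : rest.count "X" ≤ r.length := by
        simp only [List.count_cons] at h
        rw [if_neg (by simpa using hc)] at h
        simpa using h
      have ih' := ih r hle
      rw [hss] at ih'
      rw [goL, if_neg (by simp [hc]), splitXr, if_neg (by simp [hc]), hss]
      have hj : (PySem.Str.join "" (c :: s)).toList
          = c.toList ++ (PySem.Str.join "" s).toList := by
        rw [toList_join_empty, toList_join_empty, cj_cons]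
      simp only [stitch, List.headD_cons, List.drop_one, List.tail_cons] at ih' ⊢
      simp only [cj_cons] at ih' ⊢
      rw [ih', hj, List.append_assoc]

theorem ports_eq (o r : List String) (h : o.count "X" ≤ r.length) :
    rpl_helper o r = rpl_helper_alt o r := by
  unfold rpl_helper rpl_helper_alt
  have hseg := fold1 o [] []
  obtain ⟨s, ss, hss⟩ : ∃ s ss, splitXr o = s :: ss := by
    cases hx : splitXr o with
    | nil => exact absurd hx (splitXr_ne_nil o)
    | cons s ss => exact ⟨s, ss, rfl⟩
  rw [hss] at hseg
  simp only [List.nil_append, consHead] at hseg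
  simp only [hseg]
  simp only [PySem.List.foldl_append_eq_flatMap, List.nil_append, List.headD_cons,
    List.drop_one, List.tail_cons]
  have hA : rpl_helper_go r 0 o = goL r o := by
    simpa using go_eq_goL o r 0
  have hmain := main_lemma o r h
  rw [hss] at hmain
  simp only [stitch, List.headD_cons, List.drop_one, List.tail_cons] at hmain
  rw [hA]
  have : (PySem.Str.join "" (goL r o)).toList
      = (PySem.Str.join ""
          (PySem.Str.join "" s ::
            (r.zip ss).flatMap (fun p => [p.1, PySem.Str.join "" p.2]))).toList := by
    rw [toList_join_empty, toList_join_empty]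
    exact hmain
  exact String.toList_injective this

-- ===== VERDICT (by name: the statement is the Claim_ definition above) =====
theorem rpl_helper_spec : Claim_equal_rpl_helper := by
  intro o r _ hpre
  unfold Spec_rpl_helper
  exact ports_eq o r hpre
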